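-- pv_equiv track=rewrite | github.com/FelipeAscencio/Greedy_Resolution | ReadyToRun/ejemplonombres.py | orden_3
-- ===== SOURCE A (Python) =====
-- def orden_3(batallas):
--     batallas_ordenadas = sorted(batallas, key=lambda x: x[1])
--     finalizacion_tot = 0
--     for i, batalla in enumerate(batallas_ordenadas):
--         terreno, peso, duracion = batalla
--         finalizacion_tot += duracion
--         batallas_ordenadas[i] = (terreno, peso, finalizacion_tot)
--     return batallas_ordenadas
-- ===== SOURCE B (Python) =====
-- def orden_3(batallas):
--     grupos = {}
--     for terreno, peso, duracion in batallas:
--         grupos.setdefault(peso, []).append((terreno, peso, duracion))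
--     resultado = []
--     acumulado = 0
--     for peso in sorted(grupos):
--         for terreno, p, duracion in grupos[peso]:
--             acumulado += duracion
--             resultado.append((terreno, p, acumulado))
--     return resultado
-- ===== Notes on version B (the rewrite author's own statement) =====
-- stated objective: alternative
-- what changed: B replaces the stable sort of the whole record list by a dict grouping battles by weight (insertion order preserved inside each group) followed by a sort of only the distinct weights, emitting the groups in weight order while accumulating durations.
import Mathlib
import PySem

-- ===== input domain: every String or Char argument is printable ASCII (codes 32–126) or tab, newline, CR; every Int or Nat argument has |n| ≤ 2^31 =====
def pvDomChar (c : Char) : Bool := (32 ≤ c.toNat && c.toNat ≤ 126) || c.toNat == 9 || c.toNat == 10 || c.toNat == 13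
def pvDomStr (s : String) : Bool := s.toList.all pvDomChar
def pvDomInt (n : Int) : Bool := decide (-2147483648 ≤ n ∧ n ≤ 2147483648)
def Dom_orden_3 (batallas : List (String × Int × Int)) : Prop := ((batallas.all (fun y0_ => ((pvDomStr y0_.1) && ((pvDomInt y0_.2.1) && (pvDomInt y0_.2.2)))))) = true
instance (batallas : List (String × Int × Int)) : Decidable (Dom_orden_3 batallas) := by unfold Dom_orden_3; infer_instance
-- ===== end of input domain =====

-- B groups battles into a dict keyed by weight and sorts only the distinct weights (stability by construction), instead of stably sorting the whole list and accumulating in place (objective: alternative).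


-- ===== PORT A =====
-- sorted copy, then a forward pass: running total added, each slot overwritten in place
-- (the in-place enumerate loop is ported as a fold carrying (rebuilt prefix, running total))
def orden_3 (batallas : List (String × Int × Int)) : List (String × Int × Int) :=
  let batallas_ordenadas := PySem.List.sorted batallas (fun x => x.2.1) false
  (batallas_ordenadas.foldl
    (fun (st : List (String × Int × Int) × Int) batalla =>
      (st.1 ++ [(batalla.1, batalla.2.1, st.2 + batalla.2.2)], st.2 + batalla.2.2))
    ([], 0)).1

-- ===== PORT B =====
-- dict of weight → list of battles (setdefault+append = modify with default []), then
-- emit the groups in sorted order of the distinct weights, accumulating the durations.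
-- grupos[peso] is ported as getD peso []: peso ranges over the dict's keys, so the
-- Python lookup never raises and getD is exact there.
def orden_3_alt (batallas : List (String × Int × Int)) : List (String × Int × Int) :=
  let grupos := batallas.foldl
    (fun (d : PySem.Dict Int (List (String × Int × Int))) b =>
      d.modify b.2.1 [] (fun g => g ++ [b]))
    PySem.Dict.empty
  let pesos := PySem.List.sorted grupos.keys (fun x => x) false
  (pesos.foldl
    (fun (st : List (String × Int × Int) × Int) peso =>
      (grupos.getD peso []).foldl
        (fun (st : List (String × Int × Int) × Int) b =>
          (st.1 ++ [(b.1, b.2.1, st.2 + b.2.2)], st.2 + b.2.2))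
        st)
    ([], 0)).1

-- ===== PRECONDITION & SPEC =====
def Spec_orden_3 (batallas : List (String × Int × Int)) (out : List (String × Int × Int)) : Prop := out = orden_3_alt batallas
instance (batallas : List (String × Int × Int)) (out : List (String × Int × Int)) : Decidable (Spec_orden_3 batallas out) := by unfold Spec_orden_3; infer_instance

-- ===== CLAIM (what is proved, stated in full; the proofs are below) =====
def Claim_equal_orden_3 : Prop := ∀ (batallas : List (String × Int × Int)), Dom_orden_3 batallas → Spec_orden_3 batallas (orden_3 batallas)

-- ===== LEMMAS AND PROOFS =====

-- reference result: forward annotation of a list with the running total of durations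
def goA : List (String × Int × Int) → Int → List (String × Int × Int)
  | [], _ => []
  | b :: r, c => (b.1, b.2.1, c + b.2.2) :: goA r (c + b.2.2)

lemma foldl_eq_goA (l : List (String × Int × Int)) :
    ∀ (acc : List (String × Int × Int)) (c : Int),
      (l.foldl
        (fun (st : List (String × Int × Int) × Int) b =>
          (st.1 ++ [(b.1, b.2.1, st.2 + b.2.2)], st.2 + b.2.2))
        (acc, c)).1 = acc ++ goA l c := by
  induction l with
  | nil => intro acc c; simp [goA]
  | cons b r ih =>
      intro acc c
      simp [List.foldl, goA, ih, List.append_assoc]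

-- ordered insert of a key into a strictly increasing key list, dropping duplicates
def oid (a : Int) : List Int → List Int
  | [] => [a]
  | c :: r => if a < c then a :: c :: r else if a = c then c :: r else c :: oid a r

lemma mem_oid (a : Int) (l : List Int) (y : Int) : y ∈ oid a l ↔ y = a ∨ y ∈ l := by
  induction l with
  | nil => simp [oid]
  | cons c r ih =>
      by_cases h1 : a < c
      · simp [oid, h1]
      · by_cases h2 : a = c
        · simp [oid, h2]
        · simp [oid, h1, h2, ih]; tauto

lemma oid_pairwise (a : Int) (l : List Int) (h : l.Pairwise (· < ·)) :
    (oid a l).Pairwise (· < ·) := by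
  induction l with
  | nil => simp [oid]
  | cons c r ih =>
      rw [List.pairwise_cons] at h
      by_cases h1 : a < c
      · simp only [oid, if_pos h1]
        refine List.pairwise_cons.2 ⟨?_, List.pairwise_cons.2 h⟩
        intro y hy
        rcases List.mem_cons.1 hy with rfl | hy
        · exact h1
        · exact lt_trans h1 (h.1 y hy)
      · by_cases h2 : a = c
        · simpa [oid, h1, h2] using List.pairwise_cons.2 h
        · simp only [oid, if_neg h1, if_neg h2]
          refine List.pairwise_cons.2 ⟨?_, ih h.2⟩
          intro y hy
          rcases (mem_oid a r y).1 hy with rfl | hy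
          · omega
          · exact h.1 y hy

lemma oid_of_mem (a : Int) (l : List Int) (h : l.Pairwise (· < ·)) (hm : a ∈ l) :
    oid a l = l := by
  induction l with
  | nil => cases hm
  | cons c r ih =>
      rw [List.pairwise_cons] at h
      rcases List.mem_cons.1 hm with rfl | hm
      · simp [oid]
      · have hca : c < a := h.1 a hm
        have h1 : ¬ a < c := by omega
        have h2 : ¬ a = c := by omega
        simp [oid, h1, h2, ih h.2 hm]

lemma oid_perm_of_not_mem (a : Int) (l : List Int) (hm : a ∉ l) :
    (oid a l).Perm (a :: l) := by
  induction l with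
  | nil => simp [oid]
  | cons c r ih =>
      have hne : a ≠ c := fun h => hm (h ▸ List.mem_cons_self)
      have hmr : a ∉ r := fun h => hm (List.mem_cons_of_mem _ h)
      by_cases h1 : a < c
      · simp [oid, h1]
      · simp only [oid, if_neg h1, if_neg hne]
        exact ((ih hmr).cons c).trans (List.Perm.swap a c r)

-- insertBy goes to the very front when x is before every element
lemma insertBy_front (before : (String × Int × Int) → (String × Int × Int) → Bool)
    (x : String × Int × Int) (l : List (String × Int × Int))
    (h : ∀ y ∈ l, before x y = true) :
    PySem.List.insertBy before x l = x :: l := by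
  cases l with
  | nil => simp [PySem.List.insertBy]
  | cons y t => simp [PySem.List.insertBy, h y List.mem_cons_self]

-- insertBy skips a leading block that x is not before
lemma insertBy_skip (before : (String × Int × Int) → (String × Int × Int) → Bool)
    (x : String × Int × Int) (s : List (String × Int × Int)) :
    ∀ (t : List (String × Int × Int)), (∀ y ∈ s, before x y = false) →
    PySem.List.insertBy before x (s ++ t) = s ++ PySem.List.insertBy before x t := by
  induction s with
  | nil => intro t _; simp
  | cons y r ih =>
      intro t h
      have hy : before x y = false := h y List.mem_cons_self
      simp only [List.cons_append, PySem.List.insertBy, hy]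
      simp [ih t (fun z hz => h z (List.mem_cons_of_mem _ hz))]

-- inserting x into a flattened family of key blocks with strictly increasing keys
lemma ins_blocks (x : String × Int × Int) :
    ∀ (ks : List Int) (g : Int → List (String × Int × Int)),
      ks.Pairwise (· < ·) →
      (∀ c ∈ ks, ∀ y ∈ g c, y.2.1 = c) →
      (x.2.1 ∉ ks → g x.2.1 = []) →
      PySem.List.insertBy (fun a b => decide (a.2.1 < b.2.1)) x (ks.flatMap g) =
        (oid x.2.1 ks).flatMap (fun c => g c ++ if x.2.1 == c then [x] else []) := by
  intro ks
  induction ks with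
  | nil =>
      intro g _ _ hga
      simp [oid, PySem.List.insertBy, hga (by simp)]
  | cons c r ih =>
      intro g hpw hkeys hga
      rw [List.pairwise_cons] at hpw
      have hkc : ∀ y ∈ g c, y.2.1 = c := hkeys c List.mem_cons_self
      have hkr : ∀ c' ∈ r, ∀ y ∈ g c', y.2.1 = c' :=
        fun c' hc' => hkeys c' (List.mem_cons_of_mem _ hc')
      by_cases h1 : x.2.1 < c
      · -- x goes in front of everything
        have hnm : x.2.1 ∉ (c :: r) := by
          intro hm
          rcases List.mem_cons.1 hm with h | h
          · omega
          · have := hpw.1 _ h; omega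
        have hfront : ∀ y ∈ (c :: r).flatMap g, (fun a b => decide (a.2.1 < b.2.1)) x y = true := by
          intro y hy
          rcases List.mem_flatMap.1 hy with ⟨c', hc', hy'⟩
          have hyk : y.2.1 = c' := hkeys c' hc' y hy'
          have : c ≤ c' := by
            rcases List.mem_cons.1 hc' with rfl | h
            · exact le_refl _
            · exact le_of_lt (hpw.1 _ h)
          simp only [decide_eq_true_eq]; omega
        rw [insertBy_front _ _ _ hfront]
        have hoid : oid x.2.1 (c :: r) = x.2.1 :: c :: r := by simp [oid, h1]
        have hge : g x.2.1 = [] := hga hnm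
        have hcongr : ∀ c' ∈ r, g c' ++ (if x.2.1 == c' then [x] else []) = g c' := by
          intro c' hc'
          have : x.2.1 ≠ c' := fun h => hnm (h ▸ List.mem_cons_of_mem _ hc')
          simp [this]
        have hne : x.2.1 ≠ c := fun h => hnm (h ▸ List.mem_cons_self)
        rw [hoid]
        simp only [List.flatMap_cons]
        rw [List.flatMap_congr hcongr]
        simp [hge, hne]
      · by_cases h2 : x.2.1 = c
        · -- x appended at the end of block c
          have hskip : ∀ y ∈ g c, (fun a b => decide (a.2.1 < b.2.1)) x y = false := by
            intro y hy
            have := hkc y hy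
            simp only [decide_eq_false_iff_not]; omega
          rw [List.flatMap_cons, insertBy_skip _ _ _ _ hskip]
          have hfront : ∀ y ∈ r.flatMap g, (fun a b => decide (a.2.1 < b.2.1)) x y = true := by
            intro y hy
            rcases List.mem_flatMap.1 hy with ⟨c', hc', hy'⟩
            have hyk : y.2.1 = c' := hkr c' hc' y hy'
            have := hpw.1 _ hc'
            simp only [decide_eq_true_eq]; omega
          rw [insertBy_front _ _ _ hfront]
          have hoid : oid x.2.1 (c :: r) = c :: r := by
            simp [oid, h2]
          have hcongr : ∀ c' ∈ r, g c' ++ (if x.2.1 == c' then [x] else []) = g c' := by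
            intro c' hc'
            have h3 := hpw.1 _ hc'
            have : x.2.1 ≠ c' := by omega
            simp [this]
          rw [hoid]
          simp only [List.flatMap_cons]
          rw [List.flatMap_congr hcongr]
          simp [h2]
        · -- c < x.2.1 : skip block c, recurse
          have hlt : c < x.2.1 := by omega
          have hskip : ∀ y ∈ g c, (fun a b => decide (a.2.1 < b.2.1)) x y = false := by
            intro y hy
            have := hkc y hy
            simp only [decide_eq_false_iff_not]; omega
          rw [List.flatMap_cons, insertBy_skip _ _ _ _ hskip]
          have hga' : x.2.1 ∉ r → g x.2.1 = [] := by
            intro hm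
            exact hga (by
              intro hcm
              rcases List.mem_cons.1 hcm with h | h
              · omega
              · exact hm h)
          rw [ih g hpw.2 hkr hga']
          have hoid : oid x.2.1 (c :: r) = c :: oid x.2.1 r := by
            simp [oid, h1, h2]
          have hne : x.2.1 ≠ c := h2
          rw [hoid]
          simp only [List.flatMap_cons]
          simp [hne]

-- the sorted distinct-key list after appending one more record
lemma oid_sortedKeys (a : Int) (L : List Int) :
    oid a (PySem.List.sorted (PySem.Set.ofList L) (fun x => x) false) =
      PySem.List.sorted (PySem.Set.ofList (L ++ [a])) (fun x => x) false := by
  have hpw := PySem.List.sorted_ofList_pairwise_lt (κ := Int) L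
  set S := PySem.List.sorted (PySem.Set.ofList L) (fun x => x) false with hS
  have hSperm : S.Perm (PySem.Set.ofList L) := PySem.List.sorted_perm _ _ _
  have hofl : PySem.Set.ofList (L ++ [a]) = PySem.Set.add (PySem.Set.ofList L) a := by
    rw [PySem.Set.ofList_eq_foldl, List.foldl_append, ← PySem.Set.ofList_eq_foldl]
    rfl
  symm
  apply PySem.List.sorted_eq_of_perm_of_pairwise_lt
  · -- perm
    rw [hofl, PySem.Set.add_eq_ite]
    by_cases hm : a ∈ PySem.Set.ofList L
    · have hmS : a ∈ S := (PySem.List.mem_sorted _ _ _ _).2 hm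
      rw [if_pos hm, oid_of_mem a S hpw hmS]
      exact hSperm
    · have hmS : a ∉ S := fun h => hm ((PySem.List.mem_sorted _ _ _ _).1 h)
      rw [if_neg hm]
      exact (oid_perm_of_not_mem a S hmS).trans
        (((hSperm.cons a).trans (List.perm_append_singleton a _).symm).symm).symm
  · exact oid_pairwise a S hpw

-- MAIN LEMMA: the stable sort by weight is the concatenation of the weight groups
-- (original order inside each group) taken in increasing order of the distinct weights.
lemma sorted_eq_flatMap_groups (xs : List (String × Int × Int)) :
    PySem.List.sorted xs (fun b => b.2.1) false =
      (PySem.List.sorted (PySem.Set.ofList (xs.map (fun b => b.2.1))) (fun x => x) false).flatMap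
        (fun c => xs.filter (fun b => b.2.1 == c)) := by
  induction xs using List.reverseRecOn with
  | nil => simp [PySem.List.sorted, PySem.Set.ofList]
  | append_singleton p x ih =>
      have hA : PySem.List.sorted (p ++ [x]) (fun b => b.2.1) false =
          PySem.List.insertBy (fun a b => decide (a.2.1 < b.2.1)) x
            (PySem.List.sorted p (fun b => b.2.1) false) := by
        rw [PySem.List.sorted_eq_foldl_insertBy, PySem.List.sorted_eq_foldl_insertBy,
          List.foldl_append]
        rfl
      rw [hA, ih]
      set ks := PySem.List.sorted (PySem.Set.ofList (p.map (fun b => b.2.1))) (fun x => x) false with hks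
      have hpw : ks.Pairwise (· < ·) := PySem.List.sorted_ofList_pairwise_lt _
      have hkeys : ∀ c ∈ ks, ∀ y ∈ p.filter (fun b => b.2.1 == c), y.2.1 = c := by
        intro c _ y hy
        have := List.of_mem_filter hy
        simpa using this
      have hga : x.2.1 ∉ ks → p.filter (fun b => b.2.1 == x.2.1) = [] := by
        intro hm
        have hnm : x.2.1 ∉ p.map (fun b => b.2.1) := by
          intro h
          exact hm ((PySem.List.mem_sorted _ _ _ _).2 ((PySem.Set.mem_ofList _ _).2 h))
        rw [List.filter_eq_nil_iff]
        intro y hy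
        simp only [beq_iff_eq]
        intro h
        exact hnm (List.mem_map.2 ⟨y, hy, h⟩)
      rw [ins_blocks x ks _ hpw hkeys hga]
      rw [List.map_append, hks, oid_sortedKeys]
      apply List.flatMap_congr
      intro c _
      simp only [List.filter_append, List.filter_cons, List.filter_nil]

-- ===== VERDICT (by name: the statement is the Claim_ definition above) =====
theorem orden_3_spec : Claim_equal_orden_3 := by
  intro batallas _
  unfold Spec_orden_3 orden_3 orden_3_alt
  have hkeys : (batallas.foldl
      (fun (d : PySem.Dict Int (List (String × Int × Int))) b =>
        d.modify b.2.1 [] (fun g => g ++ [b])) PySem.Dict.empty).keys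
      = PySem.Set.ofList (batallas.map (fun b => b.2.1)) := by
    rw [PySem.Dict.keys_foldl_modify_key batallas (fun b => b.2.1) []
      (fun _ b g => g ++ [b]) PySem.Dict.empty, PySem.Dict.keys_empty,
      PySem.Set.ofList_eq_foldl]
    rfl
  have hgetD : ∀ c, (batallas.foldl
      (fun (d : PySem.Dict Int (List (String × Int × Int))) b =>
        d.modify b.2.1 [] (fun g => g ++ [b])) PySem.Dict.empty).getD c []
      = batallas.filter (fun b => b.2.1 == c) := by
    intro c
    have h1 : batallas.foldl
        (fun (d : PySem.Dict Int (List (String × Int × Int))) b =>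
          d.modify b.2.1 [] (fun g => g ++ [b])) PySem.Dict.empty
        = (batallas.map (fun b => (b.2.1, b))).foldl
            (fun d p => d.modify p.1 [] (fun g => g ++ [p.2])) PySem.Dict.empty := by
      rw [List.foldl_map]
    rw [h1, PySem.Dict.getD_foldl_modify_append]
    simp [List.filter_map, Function.comp_def]
  simp only [hkeys, hgetD]
  rw [← List.foldl_flatMap]
  rw [foldl_eq_goA, foldl_eq_goA, sorted_eq_flatMap_groups]
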